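-- pv_equiv track=rewrite | github.com/riffsircar/blend-elites | get_label.py | get_label_ki
-- ===== SOURCE A (Python) =====
-- def get_label_ki(level):
-- 	#{'#': 0, '-': 1, 'D': 2, 'H': 3, 'M': 4, 'P': 5, 'T': 6}
-- 	label = [False,False,False,False]  # Enemy, Doors, Moving, T
-- 	temp = ''
-- 	for l in level:
-- 		temp += ''.join(l)
-- 	if 'H' in temp:
-- 		label[0] = True
-- 	if 'D' in temp:
-- 		label[1] = True
-- 	if 'M' in temp:
-- 		label[2] = True
-- 	if 'T' in temp:
-- 		label[3] = True
-- 	return label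
-- ===== SOURCE B (Python) =====
-- def get_label_ki(level):
--     h = d = m = t = False
--     for l in level:
--         for s in l:
--             for c in s:
--                 if c == 'H':
--                     h = True
--                 elif c == 'D':
--                     d = True
--                 elif c == 'M':
--                     m = True
--                 elif c == 'T':
--                     t = True
--     return [h, d, m, t]
-- ===== Notes on version B (the rewrite author's own statement) =====
-- stated objective: alternative
-- what changed: B makes a single character-by-character pass over the rows, updating four boolean flags in a first-match branch chain, instead of concatenating all rows into one string and running four separate substring scans with conditional index assignments; no intermediate string or container is built.
import Mathlib
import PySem

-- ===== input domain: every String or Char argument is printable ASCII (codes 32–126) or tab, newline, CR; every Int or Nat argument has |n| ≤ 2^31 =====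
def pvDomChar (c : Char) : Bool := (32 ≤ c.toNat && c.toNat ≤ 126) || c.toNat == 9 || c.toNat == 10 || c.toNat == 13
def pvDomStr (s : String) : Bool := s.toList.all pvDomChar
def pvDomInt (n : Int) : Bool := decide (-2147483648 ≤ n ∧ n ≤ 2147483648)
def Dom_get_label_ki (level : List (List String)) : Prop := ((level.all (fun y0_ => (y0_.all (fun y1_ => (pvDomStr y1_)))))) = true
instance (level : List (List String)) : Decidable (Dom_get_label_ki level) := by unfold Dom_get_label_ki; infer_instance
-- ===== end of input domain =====

-- B replaces A's concatenate-then-scan-four-times with one character-by-character pass that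
-- updates four boolean flags in a branch chain (alternative decomposition, no intermediate string).


-- ===== PORT A =====
-- temp += ''.join(l); label[i] = True under the four substring tests
def get_label_ki (level : List (List String)) : List Bool :=
  let temp : List Char :=
    level.foldl (fun t l => t ++ PySem.Chars.join [] (l.map String.toList)) []
  let label : List Bool := [false, false, false, false]
  let label := if PySem.Chars.isIn ['H'] temp then PySem.List.pySetD label 0 true else label
  let label := if PySem.Chars.isIn ['D'] temp then PySem.List.pySetD label 1 true else label
  let label := if PySem.Chars.isIn ['M'] temp then PySem.List.pySetD label 2 true else label
  let label := if PySem.Chars.isIn ['T'] temp then PySem.List.pySetD label 3 true else label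
  label

-- ===== PORT B =====
-- one pass over the characters: if/elif chain updating the four flags (h, d, m, t)
def pvStep (st : Bool × Bool × Bool × Bool) (c : Char) : Bool × Bool × Bool × Bool :=
  if c = 'H' then (true, st.2.1, st.2.2.1, st.2.2.2)
  else if c = 'D' then (st.1, true, st.2.2.1, st.2.2.2)
  else if c = 'M' then (st.1, st.2.1, true, st.2.2.2)
  else if c = 'T' then (st.1, st.2.1, st.2.2.1, true)
  else st

def get_label_ki_alt (level : List (List String)) : List Bool :=
  let st :=
    level.foldl (fun st l => l.foldl (fun st s => s.toList.foldl pvStep st) st)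
      (false, false, false, false)
  [st.1, st.2.1, st.2.2.1, st.2.2.2]

-- ===== PRECONDITION & SPEC =====
def Spec_get_label_ki (level : List (List String)) (out : List Bool) : Prop := out = get_label_ki_alt level
instance (level : List (List String)) (out : List Bool) : Decidable (Spec_get_label_ki level out) := by unfold Spec_get_label_ki; infer_instance

-- ===== CLAIM =====
def Claim_equal_get_label_ki : Prop := ∀ (level : List (List String)), Dom_get_label_ki level → Spec_get_label_ki level (get_label_ki level)

-- ===== LEMMAS AND PROOFS =====

-- membership in ''.join(l) over a row of strings
theorem pv_mem_intercalate (c : Char) (xss : List (List Char)) :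
    c ∈ List.intercalate [] xss ↔ ∃ cs ∈ xss, c ∈ cs := by
  induction xss with
  | nil => simp [List.intercalate]
  | cons cs rest ih =>
    cases rest with
    | nil => simp [List.intercalate]
    | cons cs' rest' =>
      have hstep : List.intercalate ([] : List Char) (cs :: cs' :: rest') =
          cs ++ List.intercalate [] (cs' :: rest') := by
        simp [List.intercalate, List.intersperse]
      rw [hstep, List.mem_append, ih]
      simp only [List.mem_cons]
      constructor
      · rintro (h | ⟨x, hx, hc⟩)
        · exact ⟨cs, Or.inl rfl, h⟩
        · exact ⟨x, Or.inr hx, hc⟩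
      · rintro ⟨x, hx | hx, hc⟩
        · exact Or.inl (hx ▸ hc)
        · exact Or.inr ⟨x, hx, hc⟩

theorem pv_mem_join (c : Char) (l : List String) :
    c ∈ PySem.Chars.join [] (l.map String.toList) ↔ ∃ s ∈ l, c ∈ s.toList := by
  rw [show PySem.Chars.join [] (l.map String.toList) = List.intercalate [] (l.map String.toList) from rfl,
    pv_mem_intercalate]
  simp

-- membership in A's accumulated concatenation
theorem pv_mem_concat (c : Char) (level : List (List String)) (t : List Char) :
    c ∈ level.foldl (fun t l => t ++ PySem.Chars.join [] (l.map String.toList)) t ↔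
      c ∈ t ∨ ∃ l ∈ level, ∃ s ∈ l, c ∈ s.toList := by
  induction level generalizing t with
  | nil => simp
  | cons l ls ih =>
    simp only [List.foldl_cons, ih, List.mem_append, pv_mem_join, List.mem_cons]
    constructor
    · rintro (⟨h | h⟩ | ⟨l', hl', h⟩)
      · exact Or.inl h
      · exact Or.inr ⟨l, Or.inl rfl, h⟩
      · exact Or.inr ⟨l', Or.inr hl', h⟩
    · rintro (h | ⟨l', hl' | hl', h⟩)
      · exact Or.inl (Or.inl h)
      · exact Or.inl (Or.inr (hl' ▸ h))
      · exact Or.inr ⟨l', hl', h⟩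

-- closed form of the character fold
theorem pv_fold_chars (cs : List Char) (st : Bool × Bool × Bool × Bool) :
    cs.foldl pvStep st =
      (st.1 || decide ('H' ∈ cs), st.2.1 || decide ('D' ∈ cs),
       st.2.2.1 || decide ('M' ∈ cs), st.2.2.2 || decide ('T' ∈ cs)) := by
  induction cs generalizing st with
  | nil => simp
  | cons c cs ih =>
    rw [List.foldl_cons, ih]
    unfold pvStep
    split_ifs with h1 h2 h3 h4
    · subst h1; simp
    · subst h2; simp
    · subst h3; simp
    · subst h4; simp
    · simp [Ne.symm h1, Ne.symm h2, Ne.symm h3, Ne.symm h4]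

-- closed form of B's whole fold
theorem pv_fold_level (level : List (List String)) (st : Bool × Bool × Bool × Bool) :
    level.foldl (fun st l => l.foldl (fun st s => s.toList.foldl pvStep st) st) st =
      (st.1 || decide (∃ l ∈ level, ∃ s ∈ l, 'H' ∈ s.toList),
       st.2.1 || decide (∃ l ∈ level, ∃ s ∈ l, 'D' ∈ s.toList),
       st.2.2.1 || decide (∃ l ∈ level, ∃ s ∈ l, 'M' ∈ s.toList),
       st.2.2.2 || decide (∃ l ∈ level, ∃ s ∈ l, 'T' ∈ s.toList)) := by
  induction level generalizing st with
  | nil => simp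
  | cons l ls ih =>
    have hrow : ∀ (st : Bool × Bool × Bool × Bool),
        l.foldl (fun st s => s.toList.foldl pvStep st) st =
          (st.1 || decide (∃ s ∈ l, 'H' ∈ s.toList),
           st.2.1 || decide (∃ s ∈ l, 'D' ∈ s.toList),
           st.2.2.1 || decide (∃ s ∈ l, 'M' ∈ s.toList),
           st.2.2.2 || decide (∃ s ∈ l, 'T' ∈ s.toList)) := by
      intro st
      induction l generalizing st with
      | nil => simp
      | cons s ss ihs =>
        rw [List.foldl_cons, pv_fold_chars, ihs]
        simp only [List.mem_cons, Prod.mk.injEq]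
        refine ⟨?_, ?_, ?_, ?_⟩ <;>
          · rw [Bool.or_assoc]; congr 1; rw [Bool.eq_iff_iff]; simp
    rw [List.foldl_cons, hrow, ih]
    simp only [List.mem_cons, Prod.mk.injEq]
    refine ⟨?_, ?_, ?_, ?_⟩ <;>
      · rw [Bool.or_assoc]; congr 1; rw [Bool.eq_iff_iff]; simp
-- the four tests agree
theorem pv_test_eq (c : Char) (level : List (List String)) :
    PySem.Chars.isIn [c]
        (level.foldl (fun t l => t ++ PySem.Chars.join [] (l.map String.toList)) []) =
      decide (∃ l ∈ level, ∃ s ∈ l, c ∈ s.toList) := by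
  rw [Bool.eq_iff_iff, PySem.Chars.isIn_iff_infix, List.singleton_infix_iff, pv_mem_concat]
  simp

-- ===== VERDICT =====
theorem get_label_ki_spec : Claim_equal_get_label_ki := by
  intro level _
  unfold Spec_get_label_ki get_label_ki get_label_ki_alt
  rw [pv_fold_level]
  simp only [pv_test_eq, Bool.false_or]
  rcases h1 : decide (∃ l ∈ level, ∃ s ∈ l, 'H' ∈ s.toList) <;>
    rcases h2 : decide (∃ l ∈ level, ∃ s ∈ l, 'D' ∈ s.toList) <;>
    rcases h3 : decide (∃ l ∈ level, ∃ s ∈ l, 'M' ∈ s.toList) <;>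
    rcases h4 : decide (∃ l ∈ level, ∃ s ∈ l, 'T' ∈ s.toList) <;> rfl
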